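-- pv_equiv track=rewrite | github.com/jrobertson627/adventofcode | 2015/day5/day5_2015.py | check_repeat_letters
-- ===== SOURCE A (Python) =====
-- def check_repeat_letters(phrase):
--     str_val = ""
--     for value1 in range(97, 123):
--         for value2 in range(97, 123):
--             str_val = chr(value1)
--             str_val += chr(value2)
--             str_val += chr(value1)
--             if phrase.find(str_val) != -1:
--                 return 1
--     return 0
-- ===== SOURCE B (Python) =====
-- def check_repeat_letters(phrase):
--     for i in range(len(phrase) - 2):
--         a, b = phrase[i], phrase[i + 1]
--         if a == phrase[i + 2] and 'a' <= a <= 'z' and 'a' <= b <= 'z':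
--             return 1
--     return 0
-- ===== Notes on version B (the rewrite author's own statement) =====
-- stated objective: faster
-- what changed: Replaces the 676-pattern generate-and-search (phrase.find for every 'xyx' pair) by a single linear scan comparing phrase[i] with phrase[i+2] and checking both characters are lowercase.
import Mathlib
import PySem

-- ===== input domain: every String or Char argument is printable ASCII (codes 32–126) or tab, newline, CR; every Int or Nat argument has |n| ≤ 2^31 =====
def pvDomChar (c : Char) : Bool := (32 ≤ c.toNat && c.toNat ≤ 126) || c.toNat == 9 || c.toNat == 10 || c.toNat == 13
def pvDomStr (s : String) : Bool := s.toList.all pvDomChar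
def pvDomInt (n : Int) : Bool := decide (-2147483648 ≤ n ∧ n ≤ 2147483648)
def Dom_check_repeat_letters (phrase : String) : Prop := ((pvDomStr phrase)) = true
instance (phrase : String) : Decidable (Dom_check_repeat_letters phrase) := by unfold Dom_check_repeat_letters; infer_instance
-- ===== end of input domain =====

-- B replaces A's generate-and-search over all 676 'xyx' patterns by one linear scan of the phrase.

-- ===== PORT A =====
-- A: for value1 in range(97,123): for value2 in range(97,123): build "xyx"; if phrase.find(str_val) != -1: return 1; finally return 0.
-- The early return from the nested loops is rendered with List.findSome?.
def check_repeat_letters (phrase : String) : Int :=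
  match (PySem.List.pyRange 97 123 1).findSome? (fun value1 =>
    (PySem.List.pyRange 97 123 1).findSome? (fun value2 =>
      let str_val := String.ofList [Char.ofNat value1.toNat]
      let str_val := str_val ++ String.ofList [Char.ofNat value2.toNat]
      let str_val := str_val ++ String.ofList [Char.ofNat value1.toNat]
      if PySem.Str.find phrase str_val ≠ -1 then some (1 : Int) else none)) with
  | some r => r
  | none => 0

-- ===== PORT B =====
-- B: single left-to-right scan; at each position compare c0 with c2 and check c0, c1 lowercase.
def bScan : List Char → Int
  | a :: b :: c :: rest =>
    if a = c ∧ 'a' ≤ a ∧ a ≤ 'z' ∧ 'a' ≤ b ∧ b ≤ 'z' then 1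
    else bScan (b :: c :: rest)
  | _ => 0

def check_repeat_letters_alt (phrase : String) : Int := bScan phrase.toList

-- ===== PRECONDITION & SPEC =====
def Spec_check_repeat_letters (phrase : String) (out : Int) : Prop := out = check_repeat_letters_alt phrase
instance (phrase : String) (out : Int) : Decidable (Spec_check_repeat_letters phrase out) := by unfold Spec_check_repeat_letters; infer_instance

-- ===== CLAIM (what is proved, stated in full; the proofs are below) =====
def Claim_equal_check_repeat_letters : Prop := ∀ (phrase : String), Dom_check_repeat_letters phrase → Spec_check_repeat_letters phrase (check_repeat_letters phrase)

-- ===== LEMMAS AND PROOFS =====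

-- The common characterisation: some 'xyx' with x, y lowercase occurs as an infix.
def HasXYX (l : List Char) : Prop :=
  ∃ x y : Char, 'a' ≤ x ∧ x ≤ 'z' ∧ 'a' ≤ y ∧ y ≤ 'z' ∧ [x, y, x] <:+: l

theorem bScan_values : ∀ l : List Char, bScan l = 0 ∨ bScan l = 1 := by
  intro l
  induction l with
  | nil => left; rfl
  | cons a t ih =>
    match t, ih with
    | [], _ => left; rfl
    | [b], _ => left; rfl
    | b :: c :: rest, ih =>
      rw [bScan]
      split
      · right; rfl
      · exact ih

theorem infix_cons {x y : Char} {a : Char} {t : List Char}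
    (h : [x, y, x] <:+: a :: t) : ([x, y, x] <+: a :: t) ∨ [x, y, x] <:+: t := by
  rcases List.infix_cons_iff.mp h with h1 | h1
  · left; exact h1
  · right; exact h1

theorem bScan_eq_one_iff : ∀ l : List Char, bScan l = 1 ↔ HasXYX l := by
  intro l
  induction l with
  | nil =>
    simp [bScan, HasXYX]
  | cons a t ih =>
    match t, ih with
    | [], _ =>
      simp only [bScan, HasXYX]
      constructor
      · intro h; cases h
      · rintro ⟨x, y, _, _, _, _, hinf⟩
        have := hinf.length_le
        simp at this
    | [b], _ =>
      simp only [bScan, HasXYX]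
      constructor
      · intro h; cases h
      · rintro ⟨x, y, _, _, _, _, hinf⟩
        have := hinf.length_le
        simp at this
    | b :: c :: rest, ih =>
      rw [bScan]
      split
      · rename_i hcond
        obtain ⟨hac, h1, h2, h3, h4⟩ := hcond
        constructor
        · intro _
          exact ⟨a, b, h1, h2, h3, h4, ⟨[], rest, by subst hac; simp⟩⟩
        · intro _; rfl
      · rename_i hcond
        rw [ih]
        unfold HasXYX
        constructor
        · rintro ⟨x, y, hx1, hx2, hy1, hy2, hinf⟩
          exact ⟨x, y, hx1, hx2, hy1, hy2, hinf.trans (List.suffix_cons a _).isInfix⟩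
        · rintro ⟨x, y, hx1, hx2, hy1, hy2, hinf⟩
          rcases infix_cons hinf with hpre | hinf'
          · exfalso
            obtain ⟨s, hs⟩ := hpre
            injection hs with h1 hs; injection hs with h2 hs; injection hs with h3 hs
            exact hcond ⟨by rw [← h1, ← h3], by rw [← h1]; exact hx1, by rw [← h1]; exact hx2,
              by rw [← h2]; exact hy1, by rw [← h2]; exact hy2⟩
          · exact ⟨x, y, hx1, hx2, hy1, hy2, hinf'⟩

theorem char_of_range {v : Int} (h1 : 97 ≤ v) (h2 : v < 123) :
    'a' ≤ Char.ofNat v.toNat ∧ Char.ofNat v.toNat ≤ 'z' := by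
  interval_cases v <;> exact ⟨by decide, by decide⟩

theorem range_of_char {x : Char} (h1 : 'a' ≤ x) (h2 : x ≤ 'z') :
    97 ≤ (x.toNat : Int) ∧ (x.toNat : Int) < 123 := by
  rw [Char.le_def, UInt32.le_iff_toNat_le] at h1 h2
  unfold Char.toNat
  have ha : 'a'.val.toNat = 97 := rfl
  have hz : 'z'.val.toNat = 122 := rfl
  rw [ha] at h1; rw [hz] at h2
  constructor <;> omega

theorem findSome?_one {α : Type} (f : α → Option Int) (hf : ∀ x, f x = none ∨ f x = some 1) :
    ∀ l : List α,
      (l.findSome? f = some 1 ↔ ∃ x ∈ l, f x = some 1) ∧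
      (l.findSome? f = none ∨ l.findSome? f = some 1) := by
  intro l
  induction l with
  | nil => simp
  | cons a t ih =>
    rw [List.findSome?_cons]
    rcases hf a with h | h <;> rw [h]
    · constructor
      · rw [ih.1]
        constructor
        · rintro ⟨x, hx, hfx⟩; exact ⟨x, List.mem_cons_of_mem a hx, hfx⟩
        · rintro ⟨x, hx, hfx⟩
          rcases List.mem_cons.mp hx with rfl | hx
          · rw [hfx] at h; cases h
          · exact ⟨x, hx, hfx⟩
      · exact ih.2
    · constructor
      · simp only [true_iff]
        exact ⟨a, List.mem_cons_self, h⟩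
      · right; rfl


def patStr (v1 v2 : Int) : String :=
  String.ofList [Char.ofNat v1.toNat] ++ String.ofList [Char.ofNat v2.toNat] ++ String.ofList [Char.ofNat v1.toNat]

def innerF (phrase : String) (v1 v2 : Int) : Option Int :=
  if PySem.Str.find phrase (patStr v1 v2) ≠ -1 then some 1 else none

def outerF (phrase : String) (v1 : Int) : Option Int :=
  (PySem.List.pyRange 97 123 1).findSome? (innerF phrase v1)

theorem A_eq (phrase : String) :
    check_repeat_letters phrase =
      match (PySem.List.pyRange 97 123 1).findSome? (outerF phrase) with
      | some r => r
      | none => 0 := rfl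

theorem inner_cases (phrase : String) (v1 v2 : Int) :
    innerF phrase v1 v2 = none ∨ innerF phrase v1 v2 = some 1 := by
  unfold innerF
  split
  · right; rfl
  · left; rfl

theorem pat_toList (v1 v2 : Int) :
    (patStr v1 v2).toList = [Char.ofNat v1.toNat, Char.ofNat v2.toNat, Char.ofNat v1.toNat] := by
  simp [patStr]

theorem findA_iff_aux (phrase : String) :
    ((PySem.List.pyRange 97 123 1).findSome? (outerF phrase) = some 1 ↔ HasXYX phrase.toList) ∧
    ((PySem.List.pyRange 97 123 1).findSome? (outerF phrase) = none ∨
     (PySem.List.pyRange 97 123 1).findSome? (outerF phrase) = some 1) := by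
  have hinner := fun v1 : Int =>
    findSome?_one (innerF phrase v1) (inner_cases phrase v1) (PySem.List.pyRange 97 123 1)
  have houter := findSome?_one (outerF phrase)
    (fun v1 => (hinner v1).2) (PySem.List.pyRange 97 123 1)
  refine ⟨houter.1.trans ?_, houter.2⟩
  constructor
  · rintro ⟨v1, hv1, hf1⟩
    unfold outerF at hf1
    rw [(hinner v1).1] at hf1
    obtain ⟨v2, hv2, hf2⟩ := hf1
    rw [PySem.List.mem_pyRange_one] at hv1 hv2
    unfold innerF at hf2
    split at hf2
    · rename_i hfind
      rw [PySem.Str.find_ne_neg_one_iff, pat_toList] at hfind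
      obtain ⟨h1a, h1z⟩ := char_of_range hv1.1 hv1.2
      obtain ⟨h2a, h2z⟩ := char_of_range hv2.1 hv2.2
      exact ⟨_, _, h1a, h1z, h2a, h2z, hfind⟩
    · cases hf2
  · rintro ⟨x, y, hx1, hx2, hy1, hy2, hinf⟩
    obtain ⟨hxl, hxr⟩ := range_of_char hx1 hx2
    obtain ⟨hyl, hyr⟩ := range_of_char hy1 hy2
    refine ⟨(x.toNat : Int), PySem.List.mem_pyRange_one.mpr ⟨hxl, hxr⟩, ?_⟩
    unfold outerF
    rw [(hinner _).1]
    refine ⟨(y.toNat : Int), PySem.List.mem_pyRange_one.mpr ⟨hyl, hyr⟩, ?_⟩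
    unfold innerF
    rw [if_pos]
    rw [PySem.Str.find_ne_neg_one_iff, pat_toList]
    simpa using hinf

theorem findA_eq_one_iff (phrase : String) :
    check_repeat_letters phrase = 1 ↔ HasXYX phrase.toList := by
  rw [A_eq]
  rcases (findA_iff_aux phrase).2 with h | h <;> rw [h]
  · simp only [← (findA_iff_aux phrase).1, h]
    constructor
    · intro h0; cases h0
    · intro h1; cases h1
  · simpa using (findA_iff_aux phrase).1.mp h

theorem A_values (phrase : String) :
    check_repeat_letters phrase = 0 ∨ check_repeat_letters phrase = 1 := by
  rw [A_eq]
  rcases (findA_iff_aux phrase).2 with h | h <;> rw [h]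
  · left; rfl
  · right; rfl

-- ===== VERDICT (by name: the statement is the Claim_ definition above) =====
theorem check_repeat_letters_spec : Claim_equal_check_repeat_letters := by
  intro phrase _
  unfold Spec_check_repeat_letters check_repeat_letters_alt
  rcases bScan_values phrase.toList with hb | hb <;>
    rcases A_values phrase with ha | ha <;> rw [hb, ha]
  · exfalso
    have := (findA_eq_one_iff phrase).mp ha
    have := (bScan_eq_one_iff phrase.toList).mpr this
    omega
  · exfalso
    have := (bScan_eq_one_iff phrase.toList).mp hb
    have := (findA_eq_one_iff phrase).mpr this
    omega
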